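-- pv_equiv track=rewrite | github.com/AMADataLabs/Core | Source/Python/datalabs/analysis/AMC/amc_address_flagging.py | is_flagged_zip
-- ===== SOURCE A (Python) =====
-- import string
--
-- def is_flagged_zip(zip_string):
--     flag = False
--
--     if zip_string is None:
--         flag = True
--
--     # if any non-digits or len > 5
--     if any([any([c not in string.digits for c in zip_string]),
--             len(zip_string) > 5]):
--         flag = True
--
--     return flag
-- ===== SOURCE B (Python) =====
-- import re
--
-- def is_flagged_zip(zip_string):
--     return re.fullmatch(r'[0-9]{0,5}', zip_string) is None
-- ===== Notes on version B (the rewrite author's own statement) =====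
-- stated objective: idiomatic
-- what changed: Replaces the per-character membership loop and length check with a single regex full-match ([0-9]{0,5}) whose failure is the flag.
import Mathlib
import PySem

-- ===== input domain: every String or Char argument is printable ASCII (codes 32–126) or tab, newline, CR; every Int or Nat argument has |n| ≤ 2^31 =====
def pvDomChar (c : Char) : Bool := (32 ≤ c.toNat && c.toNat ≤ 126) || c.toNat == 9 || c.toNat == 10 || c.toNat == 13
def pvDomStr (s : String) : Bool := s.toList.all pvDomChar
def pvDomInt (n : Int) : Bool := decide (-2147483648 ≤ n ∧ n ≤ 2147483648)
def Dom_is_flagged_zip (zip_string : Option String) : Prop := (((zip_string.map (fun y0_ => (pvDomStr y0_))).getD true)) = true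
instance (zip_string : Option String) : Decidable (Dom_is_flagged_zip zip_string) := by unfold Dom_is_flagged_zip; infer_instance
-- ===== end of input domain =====

-- B flags a zip with one regex full-match ([0-9]{0,5}) instead of A's per-character loop (objective: idiomatic).


-- ===== PORT A =====
-- A iterates the string testing `c not in string.digits`, then checks len > 5; on None it raises (excluded by Pre_).
def is_flagged_zip (zip_string : Option String) : Bool :=
  match zip_string with
  | none => true   -- unreachable under Pre_: Python A raises TypeError iterating None
  | some s =>
    let flag := false
    let flag := if ((s.toList.map (fun c => !("0123456789".toList.contains c))).any id
                    || decide (s.toList.length > 5)) then true else flag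
    flag

-- ===== PORT B =====
-- Hand port of re.fullmatch(r'[0-9]{0,5}', s): exact DFA of the regex — state = digits matched so far
-- (none = dead state); the match succeeds iff the whole string is consumed in a live state.
def zipDfaStep (st : Option Nat) (c : Char) : Option Nat :=
  match st with
  | none => none
  | some k => if ("0123456789".toList.contains c) && k < 5 then some (k + 1) else none

def is_flagged_zip_alt (zip_string : Option String) : Bool :=
  match zip_string with
  | none => true   -- unreachable under Pre_: re.fullmatch raises TypeError on None
  | some s => (s.toList.foldl zipDfaStep (some 0)).isNone

-- ===== PRECONDITION & SPEC =====
-- Pre_ excludes None, on which A (iterating None) and B (re.fullmatch on None) both raise TypeError.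
def Pre_is_flagged_zip (zip_string : Option String) : Prop := zip_string.isSome = true
instance (zip_string : Option String) : Decidable (Pre_is_flagged_zip zip_string) := by unfold Pre_is_flagged_zip; infer_instance
def pvWitness_is_flagged_zip : Option String := some "12345"

def Spec_is_flagged_zip (zip_string : Option String) (out : Bool) : Prop := out = is_flagged_zip_alt zip_string
instance (zip_string : Option String) (out : Bool) : Decidable (Spec_is_flagged_zip zip_string out) := by unfold Spec_is_flagged_zip; infer_instance

-- ===== CLAIM (what is proved, stated in full; the proofs are below) =====
def Claim_equal_is_flagged_zip : Prop := ∀ (zip_string : Option String), Dom_is_flagged_zip zip_string → Pre_is_flagged_zip zip_string → Spec_is_flagged_zip zip_string (is_flagged_zip zip_string)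

-- ===== LEMMAS AND PROOFS =====

-- Dead state stays dead.
theorem zipDfa_foldl_none (l : List Char) : l.foldl zipDfaStep none = none := by
  induction l with
  | nil => rfl
  | cons c t ih => simpa [zipDfaStep] using ih

-- DFA invariant: from a live state k ≤ 5 the fold survives iff every char is a digit and the count stays ≤ 5.
theorem zipDfa_foldl (l : List Char) (k : Nat) (hk : k ≤ 5) :
    l.foldl zipDfaStep (some k) =
      if (l.all fun c => "0123456789".toList.contains c) && decide (k + l.length ≤ 5)
      then some (k + l.length) else none := by
  induction l generalizing k with
  | nil => simp [hk]
  | cons c t ih =>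
    simp only [List.foldl_cons, List.all_cons, List.length_cons, zipDfaStep]
    by_cases hc : ("0123456789".toList.contains c) = true
    · rw [hc]
      by_cases hk' : k < 5
      · rw [decide_eq_true hk', Bool.and_true, if_pos rfl, ih (k + 1) (by omega),
            show k + 1 + t.length = k + (t.length + 1) from by omega]
        simp only [Bool.true_and]
        rfl
      · rw [decide_eq_false hk', Bool.and_false, if_neg (by simp), zipDfa_foldl_none,
            if_neg (by simp only [Bool.true_and, Bool.and_eq_true, decide_eq_true_eq]
                       rintro ⟨-, h⟩; omega)]
    · rw [Bool.eq_false_iff.mpr hc]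
      simp only [Bool.false_and]
      rw [if_neg (by simp), zipDfa_foldl_none, if_neg (by simp)]

-- A's any-non-digit test is the negation of the all-digits test.
theorem zipMap_any (l : List Char) :
    ((l.map fun c => !("0123456789".toList.contains c)).any id)
      = !(l.all fun c => "0123456789".toList.contains c) := by
  induction l with
  | nil => rfl
  | cons c t ih =>
    simp only [List.map_cons, List.any_cons, List.all_cons, Bool.not_and, id, ih]

-- A's flag condition is exactly the failure of B's DFA.
theorem zipDfa_none (l : List Char) :
    ((l.foldl zipDfaStep (some 0)).isNone)
      = ((l.map fun c => !("0123456789".toList.contains c)).any id || decide (l.length > 5)) := by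
  rw [zipDfa_foldl l 0 (by omega), zipMap_any]
  generalize (l.all fun c => "0123456789".toList.contains c) = a
  by_cases h5 : l.length ≤ 5 <;> cases a <;> simp [h5] <;> omega

-- ===== VERDICT (by name: the statement is the Claim_ definition above) =====
theorem is_flagged_zip_spec : Claim_equal_is_flagged_zip := by
  intro zs _ hpre
  match zs with
  | none => simp [Pre_is_flagged_zip] at hpre
  | some s =>
    show is_flagged_zip (some s) = is_flagged_zip_alt (some s)
    simp only [is_flagged_zip, is_flagged_zip_alt, zipDfa_none]
    split
    · next h => exact h.symm
    · next h => exact (Bool.eq_false_iff.mpr h).symm
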